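-- pv_equiv track=rewrite | github.com/arbor-sim/arbor | doc/scripts/sample_tree.py | arm_children
-- ===== SOURCE A (Python) =====
-- def is_collocated(X, Y, i, j):
--     return X[i]==X[j] and Y[i]==Y[j]
--
-- def arm_children(X, Y, children, i):
--     result = []
--     for j in children[i]:
--         if is_collocated(X,Y,i,j):
--             result += arm_children(X, Y, children, j)
--         else:
--             result.append(j)
--     return result
-- ===== SOURCE B (Python) =====
-- def arm_children(X, Y, children, i):
--     result = []
--     stack = [(i, c) for c in reversed(children[i])]
--     while stack:
--         p, n = stack.pop()
--         if X[p] == X[n] and Y[p] == Y[n]: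
--             for c in reversed(children[n]):
--                 stack.append((n, c))
--         else:
--             result.append(n)
--     return result
-- ===== Notes on version B (the rewrite author's own statement) =====
-- stated objective: alternative
-- what changed: Replaces the recursive pre-order traversal by an iterative DFS with an explicit stack of (parent, child) pairs, children pushed in reverse so popping preserves the original order.
import Mathlib
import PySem

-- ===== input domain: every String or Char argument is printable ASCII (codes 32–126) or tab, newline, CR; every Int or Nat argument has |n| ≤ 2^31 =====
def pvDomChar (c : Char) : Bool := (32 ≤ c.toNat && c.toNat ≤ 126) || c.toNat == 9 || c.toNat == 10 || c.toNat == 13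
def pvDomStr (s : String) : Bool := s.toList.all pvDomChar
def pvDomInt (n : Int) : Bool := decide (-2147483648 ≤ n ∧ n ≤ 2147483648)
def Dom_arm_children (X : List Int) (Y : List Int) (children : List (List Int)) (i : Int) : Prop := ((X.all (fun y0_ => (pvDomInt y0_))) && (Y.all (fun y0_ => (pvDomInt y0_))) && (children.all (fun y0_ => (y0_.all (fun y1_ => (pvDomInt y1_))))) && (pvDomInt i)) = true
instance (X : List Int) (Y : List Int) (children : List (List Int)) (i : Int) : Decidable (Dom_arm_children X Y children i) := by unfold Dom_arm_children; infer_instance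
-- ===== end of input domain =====

-- B replaces A's recursive pre-order traversal by an iterative DFS over an explicit stack
-- of (parent, child) pairs (objective: alternative decomposition; same values, same order).

-- ===== PORT A =====
-- shared with port B: Python list indexing X[i] (value part; Pre_ keeps indices in range)
def pvGetI (X : List Int) (i : Int) : Int := (PySem.List.pyGet? X i).getD 0
def pvGetL (c : List (List Int)) (i : Int) : List Int := (PySem.List.pyGet? c i).getD []
-- is_collocated(X, Y, i, j)
def pvColl (X Y : List Int) (i j : Int) : Bool :=
  pvGetI X i == pvGetI X j && pvGetI Y i == pvGetI Y j

-- A's recursion can run forever (a collocated cycle); the fuel argument only makes the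
-- literal transliteration total — Pre_ guarantees it is never exhausted.
def armA (X Y : List Int) (children : List (List Int)) : Nat → Int → List Int
  | 0, _ => []
  | fuel+1, i =>
    (pvGetL children i).foldl
      (fun result j =>
        if pvColl X Y i j then result ++ armA X Y children fuel j
        else result ++ [j]) []

def arm_children (X : List Int) (Y : List Int) (children : List (List Int)) (i : Int) : List Int :=
  armA X Y children (children.length + 1) i

-- ===== PORT B =====
-- the while-stack loop of Source B; list head = top of stack; fuel only makes the loop total
def armB (X Y : List Int) (children : List (List Int)) : Nat → List (Int × Int) → List Int → List Int
  | 0, _, acc => acc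
  | _+1, [], acc => acc
  | fuel+1, (p, n) :: rest, acc =>
    if pvColl X Y p n then
      armB X Y children fuel ((pvGetL children n).map (fun c => (n, c)) ++ rest) acc
    else
      armB X Y children fuel rest (acc ++ [n])

def arm_children_alt (X : List Int) (Y : List Int) (children : List (List Int)) (i : Int) : List Int :=
  armB X Y children (((children.map List.length).sum + 2) ^ (children.length + 1))
    ((pvGetL children i).map (fun c => (i, c))) []

-- ===== PRECONDITION & SPEC =====
-- one edge (k, j) of A's traversal, with Python's evaluation order of is_collocated:
-- X[k], X[j] are always read, Y only if the X's agree, children[j] only if collocated;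
-- 'rec' is the validity of the collocated child (the recursive slot).
def pvEdge (X Y : List Int) (children : List (List Int)) (rec : Int → Bool) (k j : Int) : Bool :=
  decide (PySem.Raise.InRange X.length k) && decide (PySem.Raise.InRange X.length j) &&
  (!(pvGetI X k == pvGetI X j) ||
    (decide (PySem.Raise.InRange Y.length k) && decide (PySem.Raise.InRange Y.length j) &&
      (!(pvGetI Y k == pvGetI Y j) ||
        (decide (PySem.Raise.InRange children.length j) && rec j))))

-- validity of the traversal from k, following collocated edges to depth ≤ f
-- (at depth f no further collocated edge may appear)
def pvOkAux (X Y : List Int) (children : List (List Int)) : Nat → Int → Bool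
  | 0, k => (pvGetL children k).all (pvEdge X Y children (fun _ => false) k)
  | f+1, k => (pvGetL children k).all (pvEdge X Y children (pvOkAux X Y children f) k)

-- depth children.length is exact: a collocated path of more edges revisits one of the
-- children.length positions, i.e. is a cycle, on which A recurses forever
def pvOkB (X Y : List Int) (children : List (List Int)) (k : Int) : Bool :=
  pvOkAux X Y children children.length k

-- Pre_ excludes exactly the inputs on which A raises: an IndexError from an out-of-range
-- access reachable along the traversal, or unbounded recursion on a collocated cycle.
def Pre_arm_children (X : List Int) (Y : List Int) (children : List (List Int)) (i : Int) : Prop :=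
  PySem.Raise.InRange children.length i ∧ pvOkB X Y children i = true

instance (X : List Int) (Y : List Int) (children : List (List Int)) (i : Int) : Decidable (Pre_arm_children X Y children i) := by
  unfold Pre_arm_children; infer_instance

def pvWitness_arm_children : List Int × List Int × List (List Int) × Int :=
  ([0, 0, 1], [0, 0, 0], [[1, 2], [], []], 0)

def Spec_arm_children (X : List Int) (Y : List Int) (children : List (List Int)) (i : Int) (out : List Int) : Prop := out = arm_children_alt X Y children i
instance (X : List Int) (Y : List Int) (children : List (List Int)) (i : Int) (out : List Int) : Decidable (Spec_arm_children X Y children i out) := by unfold Spec_arm_children; infer_instance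

-- ===== CLAIM (what is proved, stated in full; the proofs are below) =====
def Claim_equal_arm_children : Prop := ∀ (X : List Int) (Y : List Int) (children : List (List Int)) (i : Int), Dom_arm_children X Y children i → Pre_arm_children X Y children i → Spec_arm_children X Y children i (arm_children X Y children i)

-- ===== LEMMAS AND PROOFS =====

theorem pv_flatMap_congr {α β : Type} {l : List α} {f g : α → List β}
    (h : ∀ x ∈ l, f x = g x) : l.flatMap f = l.flatMap g := by
  induction l with
  | nil => rfl
  | cons a t ih =>
    simp only [List.flatMap_cons, h a (by simp), ih (fun x hx => h x (by simp [hx]))]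

theorem armA_succ (X Y : List Int) (children : List (List Int)) (fuel : Nat) (n : Int) :
    armA X Y children (fuel + 1) n =
      (pvGetL children n).flatMap
        (fun j => if pvColl X Y n j then armA X Y children fuel j else [j]) := by
  show (pvGetL children n).foldl _ [] = _
  rw [show (fun (result : List Int) j =>
        if pvColl X Y n j then result ++ armA X Y children fuel j else result ++ [j])
      = (fun (result : List Int) j =>
        result ++ (if pvColl X Y n j then armA X Y children fuel j else [j])) from by
    funext r j; split <;> rfl]
  rw [PySem.List.foldl_append_eq_flatMap]
  rfl

-- pvEdge is monotone in its recursive slot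
theorem pvEdge_mono (X Y : List Int) (children : List (List Int)) (r1 r2 : Int → Bool)
    (h : ∀ j, r1 j = true → r2 j = true) (k j : Int)
    (he : pvEdge X Y children r1 k j = true) : pvEdge X Y children r2 k j = true := by
  unfold pvEdge at he ⊢
  simp only [Bool.and_eq_true, Bool.or_eq_true] at he ⊢
  tauto

-- pvOkAux is monotone in fuel
theorem pvOk_mono (X Y : List Int) (children : List (List Int)) :
    ∀ f g (n : Int), f ≤ g → pvOkAux X Y children f n = true → pvOkAux X Y children g n = true := by
  intro f
  induction f with
  | zero =>
    intro g n _ h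
    cases g with
    | zero => exact h
    | succ e =>
      simp only [pvOkAux, List.all_eq_true] at h ⊢
      intro j hj
      exact pvEdge_mono X Y children _ _ (by intro _ h; cases h) n j (h j hj)
  | succ f ih =>
    intro g n hfg h
    match g, hfg with
    | e + 1, hfg =>
      simp only [pvOkAux, List.all_eq_true] at h ⊢
      intro j hj
      exact pvEdge_mono X Y children _ _ (fun j hh => ih e j (by omega) hh) n j (h j hj)

-- what a valid collocated edge gives: the fuel was positive, the child is a valid index
-- into children, and it is valid one level deeper
theorem pvOk_coll (X Y : List Int) (children : List (List Int)) (f : Nat) (k j : Int)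
    (hok : pvOkAux X Y children f k = true) (hj : j ∈ pvGetL children k)
    (hc : pvColl X Y k j = true) :
    ∃ e, f = e + 1 ∧ PySem.Raise.InRange children.length j ∧
      pvOkAux X Y children e j = true := by
  have hcx : pvGetI X k = pvGetI X j := by
    have := hc; unfold pvColl at this
    exact beq_iff_eq.mp (Bool.and_elim_left this)
  have hcy : pvGetI Y k = pvGetI Y j := by
    have := hc; unfold pvColl at this
    exact beq_iff_eq.mp (Bool.and_elim_right this)
  cases f with
  | zero =>
    have h := (List.all_eq_true.mp hok) j hj
    unfold pvEdge at h
    simp [hcx, hcy] at h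
  | succ e =>
    have h := (List.all_eq_true.mp hok) j hj
    unfold pvEdge at h
    simp only [hcx, hcy, beq_self_eq_true, Bool.not_true, Bool.false_or,
      Bool.and_eq_true, decide_eq_true_iff] at h
    exact ⟨e, rfl, h.2.2.1, h.2.2.2⟩

-- linear search for the least fuel making a predicate true
def pvFind (p : Nat → Bool) : Nat → Nat → Nat
  | 0, k => k
  | f+1, k => if p k then k else pvFind p f (k+1)

theorem pvFind_le (p : Nat → Bool) :
    ∀ f k d, k ≤ d → d < k + f → p d = true → pvFind p f k ≤ d := by
  intro f
  induction f with
  | zero => intro k d h1 h2 _; omega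
  | succ f ih =>
    intro k d h1 h2 hp
    by_cases hk : p k = true
    · rw [pvFind, if_pos hk]; exact h1
    · rw [pvFind, if_neg hk]
      have hne : k ≠ d := fun he => hk (he ▸ hp)
      exact ih (k+1) d (by omega) (by omega) hp

theorem pvFind_true (p : Nat → Bool) :
    ∀ f k d, k ≤ d → d < k + f → p d = true → p (pvFind p f k) = true := by
  intro f
  induction f with
  | zero => intro k d h1 h2 _; omega
  | succ f ih =>
    intro k d h1 h2 hp
    by_cases hk : p k = true
    · rw [pvFind, if_pos hk]; exact hk
    · rw [pvFind, if_neg hk]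
      have hne : k ≠ d := fun he => hk (he ▸ hp)
      exact ih (k+1) d (by omega) (by omega) hp

-- the least fuel ≤ children.length validating node n (children.length + 1 if none)
def pvDepth (X Y : List Int) (children : List (List Int)) (n : Int) : Nat :=
  pvFind (fun f => pvOkAux X Y children f n) (children.length + 1) 0

theorem pvDepth_le (X Y : List Int) (children : List (List Int)) (n : Int) (d : Nat)
    (hd : d ≤ children.length) (h : pvOkAux X Y children d n = true) :
    pvDepth X Y children n ≤ d := by
  unfold pvDepth
  exact pvFind_le (fun f => pvOkAux X Y children f n) (children.length + 1) 0 d (by omega) (by omega) h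

theorem pvDepth_ok (X Y : List Int) (children : List (List Int)) (n : Int)
    (h : pvOkB X Y children n = true) :
    pvOkAux X Y children (pvDepth X Y children n) n = true := by
  unfold pvDepth
  exact pvFind_true (fun f => pvOkAux X Y children f n) (children.length + 1) 0 children.length (by omega) (by omega) h

-- collocated edges of valid nodes lead to valid nodes of strictly smaller depth
theorem pv_coll_main (X Y : List Int) (children : List (List Int)) (k j : Int)
    (hok : pvOkB X Y children k = true) (hj : j ∈ pvGetL children k)
    (hc : pvColl X Y k j = true) :
    pvOkB X Y children j = true ∧ pvDepth X Y children j < pvDepth X Y children k := by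
  have hdle : pvDepth X Y children k ≤ children.length :=
    pvDepth_le X Y children k children.length (le_refl _) hok
  obtain ⟨e, hde, -, hej⟩ := pvOk_coll X Y children _ k j (pvDepth_ok X Y children k hok) hj hc
  refine ⟨pvOk_mono X Y children e children.length j (by omega) hej, ?_⟩
  have := pvDepth_le X Y children j e (by omega) hej
  omega

-- fuel irrelevance for A's port on valid nodes
theorem armA_fuel (X Y : List Int) (children : List (List Int)) :
    ∀ f (n : Int), pvOkAux X Y children f n = true →
      ∀ g₁ g₂, f + 1 ≤ g₁ → f + 1 ≤ g₂ →
        armA X Y children g₁ n = armA X Y children g₂ n := by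
  intro f
  induction f with
  | zero =>
    intro n hok g₁ g₂ h1 h2
    match g₁, g₂, h1, h2 with
    | a + 1, b + 1, _, _ =>
      rw [armA_succ, armA_succ]
      apply pv_flatMap_congr
      intro j hj
      by_cases hc : pvColl X Y n j = true
      · obtain ⟨e, he, -, -⟩ := pvOk_coll X Y children 0 n j hok hj hc
        omega
      · simp [hc]
  | succ f ih =>
    intro n hok g₁ g₂ h1 h2
    match g₁, g₂, h1, h2 with
    | a + 1, b + 1, h1, h2 =>
      rw [armA_succ, armA_succ]
      apply pv_flatMap_congr
      intro j hj
      by_cases hc : pvColl X Y n j = true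
      · obtain ⟨e, he, -, hej⟩ := pvOk_coll X Y children (f+1) n j hok hj hc
        have hef : e = f := by omega
        subst hef
        simp only [hc, if_true]
        exact ih j hej a b (by omega) (by omega)
      · simp [hc]

theorem R_unfold (X Y : List Int) (children : List (List Int)) (n : Int)
    (hok : pvOkB X Y children n = true) :
    arm_children X Y children n =
      (pvGetL children n).flatMap
        (fun j => if pvColl X Y n j then arm_children X Y children j else [j]) := by
  show armA X Y children (children.length + 1) n = _
  rw [armA_succ]
  apply pv_flatMap_congr
  intro j hj
  by_cases hc : pvColl X Y n j = true
  · obtain ⟨e, he, -, hej⟩ := pvOk_coll X Y children children.length n j hok hj hc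
    simp only [hc, if_true]
    exact armA_fuel X Y children e j hej children.length (children.length + 1)
      (by omega) (by omega)
  · simp [hc]

-- cost measure for B's stack loop
def pvC (children : List (List Int)) : Nat := (children.map List.length).sum + 2

def pairCost (X Y : List Int) (children : List (List Int)) (pr : Int × Int) : Nat :=
  if pvColl X Y pr.1 pr.2 then (pvC children) ^ (pvDepth X Y children pr.2 + 1) else 1

def stackCost (X Y : List Int) (children : List (List Int)) (st : List (Int × Int)) : Nat :=
  (st.map (pairCost X Y children)).sum

theorem pairCost_pos (X Y : List Int) (children : List (List Int)) (pr : Int × Int) :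
    1 ≤ pairCost X Y children pr := by
  unfold pairCost
  split
  · exact Nat.one_le_pow _ _ (by unfold pvC; omega)
  · exact le_refl 1

theorem pvGetL_len_le (children : List (List Int)) (k : Int) :
    (pvGetL children k).length ≤ (children.map List.length).sum := by
  unfold pvGetL
  cases h : PySem.List.pyGet? children k with
  | none => simp
  | some l =>
    have hm : l ∈ children := PySem.List.mem_of_pyGet?_eq_some children h
    simpa using List.single_le_sum (fun (_ : Nat) _ => Nat.zero_le _) _
      (List.mem_map_of_mem (f := List.length) hm)

theorem stackCost_cons (X Y : List Int) (children : List (List Int)) (pr : Int × Int)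
    (st : List (Int × Int)) :
    stackCost X Y children (pr :: st) = pairCost X Y children pr + stackCost X Y children st := by
  simp [stackCost]

theorem stackCost_append (X Y : List Int) (children : List (List Int))
    (s t : List (Int × Int)) :
    stackCost X Y children (s ++ t) = stackCost X Y children s + stackCost X Y children t := by
  simp [stackCost]

theorem stackCost_map_le (X Y : List Int) (children : List (List Int)) (n : Int) (b : Nat)
    (l : List Int) (h : ∀ c ∈ l, pairCost X Y children (n, c) ≤ b) :
    stackCost X Y children (l.map (fun c => (n, c))) ≤ l.length * b := by
  induction l with
  | nil => simp [stackCost]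
  | cons a t ih =>
    have h1 := ih (fun c hc => h c (by simp [hc]))
    have h2 := h a (by simp)
    rw [List.map_cons, stackCost_cons]
    have : (a :: t).length * b = b + t.length * b := by simp [List.length_cons]; ring
    omega

theorem pv_arith (S A : Nat) (hA : 1 ≤ A) : S * A + 1 ≤ A * (S + 2) := by nlinarith

-- per-pair invariant of the stack: a collocated pair's child node is valid
def pvInv (X Y : List Int) (children : List (List Int)) (pr : Int × Int) : Prop :=
  pvColl X Y pr.1 pr.2 = true → pvOkB X Y children pr.2 = true

theorem armB_loop (X Y : List Int) (children : List (List Int)) :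
    ∀ fuel (stack : List (Int × Int)) (acc : List Int),
      (∀ pr ∈ stack, pvInv X Y children pr) →
      stackCost X Y children stack ≤ fuel →
      armB X Y children fuel stack acc =
        acc ++ stack.flatMap
          (fun pr => if pvColl X Y pr.1 pr.2 then arm_children X Y children pr.2 else [pr.2]) := by
  intro fuel
  induction fuel with
  | zero =>
    intro stack acc hgood hcost
    match stack with
    | [] => simp [armB]
    | pr :: rest =>
      exfalso
      have := pairCost_pos X Y children pr
      rw [stackCost_cons] at hcost
      omega
  | succ f ih =>
    intro stack acc hgood hcost
    match stack with
    | [] => simp [armB]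
    | (p, n) :: rest =>
      by_cases hc : pvColl X Y p n = true
      · have hok : pvOkB X Y children n = true := hgood (p, n) (by simp) hc
        have step : armB X Y children (f + 1) ((p, n) :: rest) acc =
            armB X Y children f ((pvGetL children n).map (fun c => (n, c)) ++ rest) acc := by
          simp [armB, hc]
        rw [step]
        set kids := pvGetL children n with hkids
        have hgood' : ∀ pr ∈ (kids.map (fun c => (n, c)) ++ rest), pvInv X Y children pr := by
          intro pr hpr
          rcases List.mem_append.mp hpr with hpr | hpr
          · obtain ⟨c, hcmem, rfl⟩ := List.mem_map.mp hpr
            intro hcol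
            exact (pv_coll_main X Y children n c hok (by rwa [← hkids]) hcol).1
          · exact hgood pr (by simp [hpr])
        have hbound : ∀ c ∈ kids, pairCost X Y children (n, c)
            ≤ (pvC children) ^ (pvDepth X Y children n) := by
          intro c hcmem
          unfold pairCost
          dsimp only
          split
          · next hcol =>
            have hlt := (pv_coll_main X Y children n c hok (by rwa [← hkids]) hcol).2
            exact Nat.pow_le_pow_right (by unfold pvC; omega) (by omega)
          · exact Nat.one_le_pow _ _ (by unfold pvC; omega)
        have hlen : kids.length ≤ pvC children - 2 := by
          have hle := pvGetL_len_le children n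
          rw [← hkids] at hle
          unfold pvC; omega
        have hkcost : stackCost X Y children (kids.map (fun c => (n, c)))
            ≤ (pvC children - 2) * (pvC children) ^ (pvDepth X Y children n) := by
          calc stackCost X Y children (kids.map (fun c => (n, c)))
              ≤ kids.length * (pvC children) ^ (pvDepth X Y children n) :=
                stackCost_map_le X Y children n _ kids hbound
            _ ≤ (pvC children - 2) * (pvC children) ^ (pvDepth X Y children n) :=
                Nat.mul_le_mul_right _ hlen
        have hpowpos : 1 ≤ (pvC children) ^ (pvDepth X Y children n) :=
          Nat.one_le_pow _ _ (by unfold pvC; omega)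
        have hCpow : (pvC children - 2) * (pvC children) ^ (pvDepth X Y children n) + 1
            ≤ (pvC children) ^ (pvDepth X Y children n + 1) := by
          rw [pow_succ]
          have h2 : pvC children - 2 = (children.map List.length).sum := by unfold pvC; omega
          rw [h2]
          show _ ≤ _ * ((children.map List.length).sum + 2)
          exact pv_arith _ _ hpowpos
        have hpc : pairCost X Y children (p, n)
            = pvC children ^ (pvDepth X Y children n + 1) := by
          unfold pairCost; simp [hc]
        have hcost' : stackCost X Y children (kids.map (fun c => (n, c)) ++ rest) ≤ f := by
          rw [stackCost_append]
          rw [stackCost_cons, hpc] at hcost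
          omega
        rw [ih _ acc hgood' hcost']
        rw [List.flatMap_append, List.flatMap_cons]
        congr 1
        congr 1
        simp only [hc, if_true]
        rw [R_unfold X Y children n hok, ← hkids]
        rw [List.flatMap_map]
      · have step : armB X Y children (f + 1) ((p, n) :: rest) acc =
            armB X Y children f rest (acc ++ [n]) := by
          simp [armB, hc]
        rw [step]
        have hcost' : stackCost X Y children rest ≤ f := by
          have := pairCost_pos X Y children (p, n)
          rw [stackCost_cons] at hcost
          omega
        rw [ih rest (acc ++ [n]) (fun pr hpr => hgood pr (by simp [hpr])) hcost']
        rw [List.flatMap_cons]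
        simp [hc]

-- ===== VERDICT (by name: the statement is the Claim_ definition above) =====
theorem arm_children_spec : Claim_equal_arm_children := by
  intro X Y children i _ hpre
  obtain ⟨-, hok⟩ := hpre
  unfold Spec_arm_children arm_children_alt
  set kids := pvGetL children i with hkids
  have hdle : pvDepth X Y children i ≤ children.length :=
    pvDepth_le X Y children i children.length (le_refl _) hok
  have hgood : ∀ pr ∈ kids.map (fun c => (i, c)), pvInv X Y children pr := by
    intro pr hpr
    obtain ⟨c, hcmem, rfl⟩ := List.mem_map.mp hpr
    intro hcol
    exact (pv_coll_main X Y children i c hok (by rwa [← hkids]) hcol).1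
  have hbound : ∀ c ∈ kids, pairCost X Y children (i, c) ≤ (pvC children) ^ children.length := by
    intro c hcmem
    unfold pairCost
    dsimp only
    split
    · next hcol =>
      have hlt := (pv_coll_main X Y children i c hok (by rwa [← hkids]) hcol).2
      exact Nat.pow_le_pow_right (by unfold pvC; omega) (by omega)
    · exact Nat.one_le_pow _ _ (by unfold pvC; omega)
  have hlen : kids.length ≤ pvC children - 2 := by
    have hle := pvGetL_len_le children i
    rw [← hkids] at hle
    unfold pvC; omega
  have hcost : stackCost X Y children (kids.map (fun c => (i, c)))
      ≤ (pvC children) ^ (children.length + 1) := by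
    calc stackCost X Y children (kids.map (fun c => (i, c)))
        ≤ kids.length * (pvC children) ^ children.length :=
          stackCost_map_le X Y children i _ kids hbound
      _ ≤ (pvC children - 2) * (pvC children) ^ children.length :=
          Nat.mul_le_mul_right _ hlen
      _ ≤ (pvC children) * (pvC children) ^ children.length :=
          Nat.mul_le_mul_right _ (by omega)
      _ = (pvC children) ^ (children.length + 1) := by rw [pow_succ]; ring
  rw [show ((children.map List.length).sum + 2) = pvC children from rfl]
  rw [armB_loop X Y children _ _ [] hgood hcost]
  rw [List.nil_append, List.flatMap_map]
  rw [R_unfold X Y children i hok, ← hkids]
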